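-- pv_equiv track=rewrite | github.com/snippet-summarization/icse23 | Code/Linking/Random-Forest/preprocessing/generate_xml.py | find_referenced_lines
-- ===== SOURCE A (Python) =====
-- def find_referenced_lines(lines):
-- 	'''
-- 	find the lines that the comment is describing
-- 	'''
-- 	commented_lines=list()
-- 	is_commented=False
-- 	for i, l in enumerate(lines):
-- 		if "<start>" in l:
-- 			is_commented=True
-- 		if is_commented:
-- 			commented_lines.append(i+1)
-- 		if "<end>" in l:
-- 			is_commented=False
--
-- 	return commented_lines
-- ===== SOURCE B (Python) =====
-- def find_referenced_lines(lines):
-- 	'''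
-- 	find the lines that the comment is describing
-- 	'''
-- 	commented_lines = []
-- 	n = len(lines)
-- 	i = 0
-- 	while i < n:
-- 		if "<start>" in lines[i]:
-- 			j = i
-- 			while j < n:
-- 				commented_lines.append(j + 1)
-- 				if "<end>" in lines[j]:
-- 					break
-- 				j += 1
-- 			i = j + 1
-- 		else:
-- 			i += 1
-- 	return commented_lines
-- ===== Notes on version B (the rewrite author's own statement) =====
-- stated objective: alternative
-- what changed: Replaces the boolean is_commented flag state machine with an index-based locate-region/consume-region structure: an outer while loop scans for a '<start>' line and an inner loop consumes and records lines up to the matching '<end>' (or the end of the list), then the outer index skips past the consumed region.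
import Mathlib
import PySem

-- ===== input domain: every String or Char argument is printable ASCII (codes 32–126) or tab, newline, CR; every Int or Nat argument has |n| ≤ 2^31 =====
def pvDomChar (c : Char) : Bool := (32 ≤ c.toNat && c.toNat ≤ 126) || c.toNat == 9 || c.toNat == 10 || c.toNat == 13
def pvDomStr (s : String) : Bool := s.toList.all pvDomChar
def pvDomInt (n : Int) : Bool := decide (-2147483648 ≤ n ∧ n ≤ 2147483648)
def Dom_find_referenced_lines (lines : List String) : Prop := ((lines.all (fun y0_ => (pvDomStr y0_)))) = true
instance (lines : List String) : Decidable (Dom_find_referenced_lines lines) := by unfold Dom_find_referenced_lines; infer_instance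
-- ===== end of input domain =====

-- B restructures A's boolean-flag single pass into a locate-region/consume-region
-- nested loop over an explicit index (alternative decomposition; return value only).
-- ===== PORT A =====
def pvALoop : List String → Nat → List Int → Bool → List Int
  | [], _, acc, _ => acc
  | l :: rest, i, acc, flag =>
    let flag1 := if PySem.Str.isIn "<start>" l then true else flag
    let acc1 := if flag1 then acc ++ [((i : Int) + 1)] else acc
    let flag2 := if PySem.Str.isIn "<end>" l then false else flag1
    pvALoop rest (i + 1) acc1 flag2

def find_referenced_lines (lines : List String) : List Int :=
  pvALoop lines 0 [] false

-- ===== PORT B =====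
-- inner loop: appends j+1 for each line until (and including) one containing "<end>";
-- returns (appended numbers, remaining lines, next index)
def pvBInner : List String → Nat → List Int × List String × Nat
  | [], j => ([], [], j)
  | l :: rest, j =>
    if PySem.Str.isIn "<end>" l then ([((j : Int) + 1)], rest, j + 1)
    else
      let r := pvBInner rest (j + 1)
      (((j : Int) + 1) :: r.1, r.2.1, r.2.2)

theorem pvBInner_rest_le : ∀ (xs : List String) (j : Nat), (pvBInner xs j).2.1.length ≤ xs.length := by
  intro xs
  induction xs with
  | nil => intro j; simp [pvBInner]
  | cons l rest ih =>
    intro j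
    simp only [pvBInner]
    split
    · simp
    · exact le_trans (ih (j + 1)) (by simp)

def pvBOuter : List String → Nat → List Int
  | [], _ => []
  | l :: ls, i =>
    if PySem.Str.isIn "<start>" l then
      let r := pvBInner (l :: ls) i
      r.1 ++ pvBOuter r.2.1 r.2.2
    else pvBOuter ls (i + 1)
termination_by xs _ => xs.length
decreasing_by
  · exact Nat.lt_succ_of_le (le_trans (by
      simp only [pvBInner]
      split
      · simp
      · exact pvBInner_rest_le ls (i + 1)) (le_refl ls.length))
  · simp

def find_referenced_lines_alt (lines : List String) : List Int :=
  pvBOuter lines 0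
-- ===== PRECONDITION & SPEC =====
def Spec_find_referenced_lines (lines : List String) (out : List Int) : Prop := out = find_referenced_lines_alt lines
instance (lines : List String) (out : List Int) : Decidable (Spec_find_referenced_lines lines out) := by unfold Spec_find_referenced_lines; infer_instance

-- ===== CLAIM (what is proved, stated in full; the proofs are below) =====
def Claim_equal_find_referenced_lines : Prop := ∀ (lines : List String), Dom_find_referenced_lines lines → Spec_find_referenced_lines lines (find_referenced_lines lines)

-- ===== LEMMAS AND PROOFS =====

-- While A's flag is on, A records exactly what B's inner loop records, and
-- resumes with the flag off on the remainder B's inner loop leaves behind.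
theorem pvALoop_true_eq : ∀ (xs : List String) (i : Nat) (acc : List Int),
    pvALoop xs i acc true
      = pvALoop (pvBInner xs i).2.1 (pvBInner xs i).2.2 (acc ++ (pvBInner xs i).1) false := by
  intro xs
  induction xs with
  | nil => intro i acc; simp [pvALoop, pvBInner]
  | cons l rest ih =>
    intro i acc
    simp only [pvALoop, pvBInner, ite_self, if_true]
    by_cases h : PySem.Str.isIn "<end>" l = true
    · simp only [h, if_true]
    · simp only [h, if_false, Bool.false_eq_true]
      rw [ih (i + 1) (acc ++ [((i : Int) + 1)])]
      simp [List.append_assoc]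

-- With the flag off, A's loop computes B's outer loop (appended to the accumulator).
theorem pvALoop_false_eq : ∀ (n : Nat) (xs : List String), xs.length ≤ n →
    ∀ (i : Nat) (acc : List Int), pvALoop xs i acc false = acc ++ pvBOuter xs i := by
  intro n
  induction n with
  | zero =>
    intro xs hlen i acc
    have : xs = [] := List.eq_nil_of_length_eq_zero (Nat.le_zero.mp hlen)
    subst this; simp [pvALoop, pvBOuter]
  | succ n ih =>
    intro xs hlen i acc
    match xs with
    | [] => simp [pvALoop, pvBOuter]
    | l :: ls =>
      by_cases hs : PySem.Str.isIn "<start>" l = true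
      · by_cases he : PySem.Str.isIn "<end>" l = true
        · -- start and end on the same line: record it and resume with the flag off
          simp only [pvALoop, pvBOuter, hs, he, if_true, pvBInner]
          rw [ih ls (Nat.le_of_succ_le_succ hlen) (i + 1) (acc ++ [((i : Int) + 1)])]
          simp
        · -- start without end: A stays flagged, which is B's inner loop
          simp only [pvALoop, hs, he, if_true, Bool.false_eq_true, if_false]
          rw [pvALoop_true_eq ls (i + 1) (acc ++ [((i : Int) + 1)])]
          rw [ih (pvBInner ls (i + 1)).2.1
              (le_trans (pvBInner_rest_le ls (i + 1)) (Nat.le_of_succ_le_succ hlen))]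
          simp only [pvBOuter, hs, if_true, pvBInner, he, Bool.false_eq_true, if_false]
          simp
      · -- no start: nothing recorded, flag stays off
        simp only [pvALoop, hs, Bool.false_eq_true, if_false, ite_self]
        rw [ih ls (Nat.le_of_succ_le_succ hlen) (i + 1) acc]
        simp only [pvBOuter, hs, Bool.false_eq_true, if_false]

-- ===== VERDICT (by name: the statement is the Claim_ definition above) =====
theorem find_referenced_lines_spec : Claim_equal_find_referenced_lines := by
  intro lines _
  unfold Spec_find_referenced_lines find_referenced_lines find_referenced_lines_alt
  rw [pvALoop_false_eq lines.length lines (le_refl _) 0 []]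
  simp
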